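-- pv_equiv track=rewrite | github.com/ltpzxgit/fdf-test-compare | app.py | extract_body_data
-- ===== SOURCE A (Python) =====
-- def extract_body_data(text):
--     if "body={" not in text:
--         return {}
--     try:
--         part = text.split("body={", 1)[1].split("}", 1)[0]
--         data = {}
--         for item in part.split(","):
--             if "=" in item:
--                 k, v = item.split("=", 1)
--                 data[k.strip()] = v.strip()
--         return data
--     except:
--         return {}
-- ===== SOURCE B (Python) =====
-- def extract_body_data(text):
--     i = text.find("body={")
--     if i == -1:
--         return {}
--     rest = text[i + 6:]
--     j = rest.find("}")
--     part = rest if j == -1 else rest[:j]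
--     data = {}
--     key, buf, has_eq = [], [], False
--     for ch in part + ",":
--         if ch == ",":
--             if has_eq:
--                 data["".join(key).strip()] = "".join(buf).strip()
--             key, buf, has_eq = [], [], False
--         elif ch == "=" and not has_eq:
--             has_eq = True
--         elif has_eq:
--             buf.append(ch)
--         else:
--             key.append(ch)
--     return data
-- ===== Notes on version B (the rewrite author's own statement) =====
-- stated objective: alternative
-- what changed: B replaces A's membership-test + three nested str.split passes (on 'body={', '}', ',' and '=') by a find+slice extraction of the body substring and a single character-at-a-time state machine that accumulates key/value buffers and commits on each comma.
import Mathlib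
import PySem

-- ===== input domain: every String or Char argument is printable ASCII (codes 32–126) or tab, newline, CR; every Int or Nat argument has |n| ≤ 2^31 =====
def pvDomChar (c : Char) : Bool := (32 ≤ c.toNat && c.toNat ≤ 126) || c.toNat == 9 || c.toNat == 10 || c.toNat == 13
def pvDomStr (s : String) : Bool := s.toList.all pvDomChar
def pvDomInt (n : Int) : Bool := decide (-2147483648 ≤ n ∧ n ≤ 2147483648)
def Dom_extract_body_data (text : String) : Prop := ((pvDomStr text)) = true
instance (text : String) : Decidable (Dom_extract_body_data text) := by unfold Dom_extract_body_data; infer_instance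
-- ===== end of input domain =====

-- B replaces A's split/split/split pipeline by find+slice extraction and a single
-- character-at-a-time state machine over the body text (objective: alternative, same cost).

-- ===== PORT A =====
def extract_body_data (text : String) : List (String × String) :=
  if PySem.Str.isIn "body={" text then
    -- try: part = text.split("body={", 1)[1].split("}", 1)[0]  (an IndexError would hit `except: return {}`)
    match PySem.List.pyGet? (PySem.Chars.splitOnMax text.toList "body={".toList 1) 1 with
    | none => []
    | some afterBody =>
      match PySem.List.pyGet? (PySem.Chars.splitOnMax afterBody "}".toList 1) 0 with
      | none => []
      | some part =>
        ((PySem.Chars.splitOn part ",".toList).foldl (fun d item =>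
          if PySem.Chars.isIn "=".toList item then
            match PySem.Chars.splitOnMax item "=".toList 1 with
            | k :: v :: _ =>
                PySem.Dict.insert d (String.ofList (PySem.Chars.strip k)) (String.ofList (PySem.Chars.strip v))
            | _ => d
          else d) (PySem.Dict.empty : PySem.Dict String String)).items
  else []

-- ===== PORT B =====
-- one step of the character state machine: state = (data, key chars, value chars, has_eq)
def ebdStep (st : PySem.Dict String String × List Char × List Char × Bool) (ch : Char) :
    PySem.Dict String String × List Char × List Char × Bool :=
  let (d, key, buf, hasEq) := st
  if ch == ',' then
    (if hasEq then
       PySem.Dict.insert d (String.ofList (PySem.Chars.strip key)) (String.ofList (PySem.Chars.strip buf))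
     else d, [], [], false)
  else if ch == '=' && !hasEq then (d, key, buf, true)
  else if hasEq then (d, key, buf ++ [ch], hasEq)
  else (d, key ++ [ch], buf, hasEq)

def extract_body_data_alt (text : String) : List (String × String) :=
  let i := PySem.Str.find text "body={"
  if i = -1 then []
  else
    let rest := PySem.List.slice text.toList (some (i + 6)) none
    let j := PySem.Chars.find rest "}".toList
    let part := if j = -1 then rest else PySem.List.slice rest none (some j)
    ((part ++ [',']).foldl ebdStep ((PySem.Dict.empty : PySem.Dict String String), [], [], false)).1.items

-- ===== PRECONDITION & SPEC =====
def Spec_extract_body_data (text : String) (out : List (String × String)) : Prop := out = extract_body_data_alt text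
instance (text : String) (out : List (String × String)) : Decidable (Spec_extract_body_data text out) := by unfold Spec_extract_body_data; infer_instance

-- ===== CLAIM (what is proved, stated in full; the proofs are below) =====
def Claim_equal_extract_body_data : Prop := ∀ (text : String), Dom_extract_body_data text → Spec_extract_body_data text (extract_body_data text)

-- ===== LEMMAS AND PROOFS =====

-- first occurrence of sep (assumed nonempty) in a char list, structurally
def ebdFo (sep : List Char) : List Char → Option Nat
  | [] => none
  | c :: r => if sep.isPrefixOf (c :: r) then some 0 else (ebdFo sep r).map (· + 1)

-- comma-separated segments of a char list, structurally
def ebdSegs : List Char → List (List Char)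
  | [] => [[]]
  | c :: r =>
    if c = ',' then [] :: ebdSegs r
    else match ebdSegs r with
         | [] => [[c]]
         | x :: xs => (c :: x) :: xs

-- A's per-item action, named for the lemmas
def ebdCommit (d : PySem.Dict String String) (item : List Char) : PySem.Dict String String :=
  if PySem.Chars.isIn "=".toList item then
    match PySem.Chars.splitOnMax item "=".toList 1 with
    | k :: v :: _ =>
        PySem.Dict.insert d (String.ofList (PySem.Chars.strip k)) (String.ofList (PySem.Chars.strip v))
    | _ => d
  else d

theorem ebdFo_none {sep : List Char} (hsep : sep ≠ []) (s : List Char) (h : ebdFo sep s = none) :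
    ∀ j, ¬ sep <+: s.drop j := by
  induction s with
  | nil =>
    intro j hp
    exact hsep (List.prefix_nil.mp (by simpa using hp))
  | cons c r ih =>
    simp only [ebdFo] at h
    by_cases hpre : sep.isPrefixOf (c :: r)
    · simp [hpre] at h
    · rw [if_neg (by simpa using hpre), Option.map_eq_none_iff] at h
      intro j hp
      cases j with
      | zero =>
        exact hpre (List.isPrefixOf_iff_prefix.mpr (by simpa using hp))
      | succ j =>
        exact ih h j (by simpa using hp)

theorem ebdFo_some {sep : List Char} (s : List Char) {i : Nat} (h : ebdFo sep s = some i) :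
    sep <+: s.drop i ∧ ∀ j < i, ¬ sep <+: s.drop j := by
  induction s generalizing i with
  | nil => simp [ebdFo] at h
  | cons c r ih =>
    simp only [ebdFo] at h
    by_cases hpre : sep.isPrefixOf (c :: r)
    · rw [if_pos (by simpa using hpre), Option.some.injEq] at h
      subst h
      exact ⟨by simpa using List.isPrefixOf_iff_prefix.mp hpre, by omega⟩
    · rw [if_neg (by simpa using hpre), Option.map_eq_some_iff] at h
      obtain ⟨i', hi', rfl⟩ := h
      obtain ⟨h1, h2⟩ := ih hi'
      refine ⟨by simpa using h1, ?_⟩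
      intro j hj hp
      cases j with
      | zero =>
        exact hpre (List.isPrefixOf_iff_prefix.mpr (by simpa using hp))
      | succ j =>
        exact h2 j (by omega) (by simpa using hp)

theorem ebdFo_eq_find {sep : List Char} (hsep : sep ≠ []) (s : List Char) :
    PySem.Chars.find s sep = (match ebdFo sep s with | none => -1 | some i => (i : Int)) := by
  cases hfo : ebdFo sep s with
  | none =>
    have hnot : ¬ sep <:+: s := by
      intro hinf
      obtain ⟨j, hj⟩ := (PySem.Chars.exists_prefix_drop_iff_isIn sep s).mpr
        ((PySem.Chars.isIn_iff_infix sep s).mpr hinf)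
      exact ebdFo_none hsep s hfo j hj
    simpa using (PySem.Chars.find_eq_neg_one_iff s sep).mpr hnot
  | some i =>
    obtain ⟨hp, hmin⟩ := ebdFo_some s hfo
    have hinf : sep <:+: s := by
      obtain ⟨v, hv⟩ := hp
      exact ⟨s.take i, v, by rw [List.append_assoc, hv, List.take_append_drop]⟩
    have hnn : 0 ≤ PySem.Chars.find s sep := (PySem.Chars.find_nonneg_iff s sep).mpr hinf
    obtain ⟨h1, h2⟩ := PySem.Chars.find_spec hnn
    have heq : (PySem.Chars.find s sep).toNat = i := by
      rcases Nat.lt_trichotomy (PySem.Chars.find s sep).toNat i with hlt | he | hgt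
      · exact absurd h1 (hmin _ hlt)
      · exact he
      · exact absurd hp (h2 i hgt)
    simp only [hfo]
    omega

theorem ebd_go_m0 (sep : List Char) (fuel : Nat) (l cur : List Char) (acc : List (List Char)) :
    PySem.Chars.splitOnMax.go sep fuel 0 l cur acc = ((cur.reverse ++ l) :: acc).reverse := by
  cases fuel with
  | zero => rw [PySem.Chars.splitOnMax.go]
  | succ f =>
    cases l with
    | nil => rw [PySem.Chars.splitOnMax.go]; simp; omega
    | cons c r => rw [PySem.Chars.splitOnMax.go]; simp

theorem ebd_go_one {sep : List Char} (hsep : sep ≠ []) :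
    ∀ fuel l, l.length < fuel → ∀ cur acc,
    PySem.Chars.splitOnMax.go sep fuel 1 l cur acc =
      match ebdFo sep l with
      | none => acc.reverse ++ [cur.reverse ++ l]
      | some i => acc.reverse ++ [cur.reverse ++ l.take i, l.drop (i + sep.length)] := by
  intro fuel
  induction fuel with
  | zero => intro l hl; omega
  | succ f ih =>
    intro l hl cur acc
    cases l with
    | nil =>
      rw [PySem.Chars.splitOnMax.go]
      simp [ebdFo]
      omega
    | cons c r =>
      rw [PySem.Chars.splitOnMax.go]
      simp only [if_neg (one_ne_zero)]
      by_cases hpre : sep.isPrefixOf (c :: r)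
      · simp only [hpre, if_true, ebdFo, Nat.sub_self]
        rw [ebd_go_m0]
        simp
      · simp only [hpre, if_false, ebdFo]
        have hr : r.length < f := by simpa using Nat.lt_of_succ_lt_succ hl
        rw [ih r hr (c :: cur) acc]
        cases hfo : ebdFo sep r with
        | none => simp
        | some i =>
          simp only [Bool.false_eq_true, if_false, Option.map_some, List.take_succ_cons]
          rw [show i + 1 + sep.length = (i + sep.length) + 1 by omega, List.drop_succ_cons]
          simp

theorem ebd_splitOnMax_one {sep : List Char} (hsep : sep ≠ []) (s : List Char) :
    PySem.Chars.splitOnMax s sep 1 =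
      match ebdFo sep s with
      | none => [s]
      | some i => [s.take i, s.drop (i + sep.length)] := by
  rw [PySem.Chars.splitOnMax]
  rw [if_neg (by norm_num)]
  rw [show (1 : Int).toNat = 1 from rfl]
  rw [ebd_go_one hsep (s.length + 1) s (by omega)]
  cases ebdFo sep s <;> simp

theorem ebdSegs_ne_nil (s : List Char) : ebdSegs s ≠ [] := by
  cases s with
  | nil => simp [ebdSegs]
  | cons c r =>
    simp only [ebdSegs]
    split
    · simp
    · split <;> simp

theorem ebdSegs_no_comma (s : List Char) (h : ',' ∉ s) : ebdSegs s = [s] := by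
  induction s with
  | nil => rfl
  | cons c r ih =>
    have hc : c ≠ ',' := fun hh => h (hh ▸ List.mem_cons_self)
    have hr := ih (fun hh => h (List.mem_cons_of_mem _ hh))
    simp [ebdSegs, hc, hr]

theorem ebdSegs_append (pre rest : List Char) (h : ',' ∉ pre) :
    ebdSegs (pre ++ ',' :: rest) = pre :: ebdSegs rest := by
  induction pre with
  | nil => simp [ebdSegs]
  | cons c p ih =>
    have hc : c ≠ ',' := fun hh => h (hh ▸ List.mem_cons_self)
    have hp := ih (fun hh => h (List.mem_cons_of_mem _ hh))
    simp [ebdSegs, hc, hp]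

theorem ebdFo_singleton_split (c : Char) (pre post : List Char) (h : c ∉ pre) :
    ebdFo [c] (pre ++ c :: post) = some pre.length := by
  induction pre with
  | nil => simp [ebdFo, List.isPrefixOf]
  | cons a p ih =>
    have ha : a ≠ c := fun hh => h (hh ▸ List.mem_cons_self)
    have hp := ih (fun hh => h (List.mem_cons_of_mem _ hh))
    simp [ebdFo, List.isPrefixOf, Ne.symm ha, hp]

theorem ebd_dropWhile_head_false (p : Char → Bool) (l : List Char) (b : Char) (t : List Char)
    (h : List.dropWhile p l = b :: t) : p b = false := by
  induction l with
  | nil => simp at h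
  | cons c r ih =>
    rw [List.dropWhile_cons] at h
    by_cases hp : p c
    · exact ih (by simpa [hp] using h)
    · rw [if_neg (by simpa using hp)] at h
      cases h
      simpa using hp

theorem ebd_splitOn_go (fuel : Nat) :
    ∀ l, l.length < fuel → ∀ cur acc,
    PySem.Chars.splitOn.go [','] fuel l cur acc =
      acc.reverse ++ (match ebdSegs l with
                      | [] => [cur.reverse]
                      | x :: xs => (cur.reverse ++ x) :: xs) := by
  induction fuel with
  | zero => intro l hl; omega
  | succ f ih =>
    intro l hl cur acc
    cases l with
    | nil =>
      rw [PySem.Chars.splitOn.go]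
      simp [ebdSegs]
      omega
    | cons c r =>
      rw [PySem.Chars.splitOn.go]
      have hr : r.length < f := by simpa using Nat.lt_of_succ_lt_succ hl
      by_cases hc : c = ','
      · subst hc
        rw [if_pos (by simp [List.isPrefixOf])]
        simp only [List.length_cons, List.length_nil, List.drop_succ_cons, List.drop_zero]
        rw [ih r hr [] (cur.reverse :: acc)]
        obtain ⟨x, xs, hseg⟩ := List.exists_cons_of_ne_nil (ebdSegs_ne_nil r)
        simp [ebdSegs, hseg]
      · rw [if_neg (by simp [List.isPrefixOf, Ne.symm hc])]
        rw [ih r hr (c :: cur) acc]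
        obtain ⟨x, xs, hseg⟩ := List.exists_cons_of_ne_nil (ebdSegs_ne_nil r)
        simp [ebdSegs, hseg, hc]

theorem ebd_splitOn_comma (s : List Char) :
    PySem.Chars.splitOn s [','] = ebdSegs s := by
  rw [PySem.Chars.splitOn]
  rw [ebd_splitOn_go (s.length + 1) s (by omega) [] []]
  obtain ⟨x, xs, hseg⟩ := List.exists_cons_of_ne_nil (ebdSegs_ne_nil s)
  simp [hseg]

-- scanning a comma-free, '='-free segment just extends the key
theorem ebd_scan_key (seg : List Char) (hc : ',' ∉ seg) (he : '=' ∉ seg)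
    (d : PySem.Dict String String) (k : List Char) :
    seg.foldl ebdStep (d, k, [], false) = (d, k ++ seg, [], false) := by
  induction seg generalizing k with
  | nil => simp
  | cons c r ih =>
    have hc' : c ≠ ',' := fun hh => hc (hh ▸ List.mem_cons_self)
    have he' : c ≠ '=' := fun hh => he (hh ▸ List.mem_cons_self)
    rw [List.foldl_cons, show ebdStep (d, k, [], false) c = (d, k ++ [c], [], false) from by
      simp [ebdStep, hc', he']]
    rw [ih (fun hh => hc (List.mem_cons_of_mem _ hh)) (fun hh => he (List.mem_cons_of_mem _ hh))]
    simp

-- scanning a comma-free segment after '=' extends the value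
theorem ebd_scan_val (seg : List Char) (hc : ',' ∉ seg)
    (d : PySem.Dict String String) (k b : List Char) :
    seg.foldl ebdStep (d, k, b, true) = (d, k, b ++ seg, true) := by
  induction seg generalizing b with
  | nil => simp
  | cons c r ih =>
    have hc' : c ≠ ',' := fun hh => hc (hh ▸ List.mem_cons_self)
    rw [List.foldl_cons, show ebdStep (d, k, b, true) c = (d, k, b ++ [c], true) from by
      simp [ebdStep, hc']]
    rw [ih (fun hh => hc (List.mem_cons_of_mem _ hh))]
    simp

-- committing one comma-free segment equals A's per-item action
theorem ebd_scan_commit (seg : List Char) (hc : ',' ∉ seg) (d : PySem.Dict String String) :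
    (seg ++ [',']).foldl ebdStep (d, [], [], false) = (ebdCommit d seg, [], [], false) := by
  by_cases he : '=' ∈ seg
  · -- seg = pre ++ '=' :: post with '=' ∉ pre
    have hdw : seg.dropWhile (· != '=') ≠ [] := by
      rw [Ne, List.dropWhile_eq_nil_iff]
      push_neg
      exact ⟨'=', he, by simp⟩
    obtain ⟨e0, post, hpost⟩ := List.exists_cons_of_ne_nil hdw
    have he0 : e0 = '=' := by
      have := ebd_dropWhile_head_false (· != '=') seg e0 post hpost
      simpa using this
    subst he0
    set pre := seg.takeWhile (· != '=') with hpre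
    have hseg : seg = pre ++ '=' :: post := by
      rw [hpre, ← hpost, List.takeWhile_append_dropWhile]
    have hpre_ne : '=' ∉ pre := by
      intro hh
      have := List.mem_takeWhile_imp hh
      simp at this
    have hpre_nc : ',' ∉ pre := fun hh => hc (hseg ▸ List.mem_append_left _ hh)
    have hpost_nc : ',' ∉ post := fun hh =>
      hc (hseg ▸ List.mem_append_right _ (List.mem_cons_of_mem _ hh))
    rw [hseg]
    rw [show (pre ++ '=' :: post) ++ [','] = pre ++ ('=' :: (post ++ [','])) from by simp]
    rw [List.foldl_append]
    rw [ebd_scan_key pre hpre_nc hpre_ne d []]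
    rw [List.foldl_cons, show ebdStep (d, [] ++ pre, [], false) '=' = (d, [] ++ pre, [], true) from by
      simp [ebdStep]]
    rw [List.foldl_append, ebd_scan_val post hpost_nc]
    rw [List.foldl_cons, show ebdStep (d, [] ++ pre, [] ++ post, true) ',' =
      (PySem.Dict.insert d (String.ofList (PySem.Chars.strip pre))
        (String.ofList (PySem.Chars.strip post)), [], [], false) from by simp [ebdStep]]
    have hin : PySem.Chars.isIn ['='] (pre ++ '=' :: post) = true := by
      rw [PySem.Chars.isIn_iff_infix]
      exact ⟨pre, post, by simp⟩
    have hsplit : PySem.Chars.splitOnMax (pre ++ '=' :: post) ['='] 1 = [pre, post] := by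
      rw [ebd_splitOnMax_one (by simp) (pre ++ '=' :: post),
        ebdFo_singleton_split '=' pre post hpre_ne]
      have h1 : (pre ++ '=' :: post).take pre.length = pre := List.take_left
      have h2 : (pre ++ '=' :: post).drop (pre.length + 1) = post := by
        rw [← List.drop_drop, List.drop_left]
        simp
      simp [h1, h2]
    simp [ebdCommit, hin, hsplit]
  · rw [List.foldl_append, ebd_scan_key seg hc he d []]
    rw [List.foldl_cons, show ebdStep (d, [] ++ seg, [], false) ',' = (d, [], [], false) from by
      simp [ebdStep]]
    have hin : PySem.Chars.isIn ['='] seg = false := by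
      rw [PySem.Chars.isIn_eq_false_iff]
      intro hinf
      exact he (List.singleton_sublist.mp hinf.sublist)
    simp [ebdCommit, hin]

theorem ebd_scan_eq_segs (part : List Char) (d : PySem.Dict String String) :
    (part ++ [',']).foldl ebdStep (d, [], [], false) =
      ((ebdSegs part).foldl ebdCommit d, [], [], false) := by
  induction hn : part.length using Nat.strong_induction_on generalizing part d with
  | _ n ih =>
  by_cases hc : ',' ∈ part
  · have hdw : part.dropWhile (· != ',') ≠ [] := by
      rw [Ne, List.dropWhile_eq_nil_iff]
      push_neg
      exact ⟨',', hc, by simp⟩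
    obtain ⟨c0, rest, hpost⟩ := List.exists_cons_of_ne_nil hdw
    have hc0 : c0 = ',' := by
      have := ebd_dropWhile_head_false (· != ',') part c0 rest hpost
      simpa using this
    subst hc0
    set pre := part.takeWhile (· != ',') with hpre
    have hseg : part = pre ++ ',' :: rest := by
      rw [hpre, ← hpost, List.takeWhile_append_dropWhile]
    have hpre_nc : ',' ∉ pre := by
      intro hh
      have := List.mem_takeWhile_imp hh
      simp at this
    rw [hseg]
    rw [show (pre ++ ',' :: rest) ++ [','] = (pre ++ [',']) ++ (rest ++ [',']) from by simp]
    rw [List.foldl_append, ebd_scan_commit pre hpre_nc d]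
    have hlen : rest.length < n := by
      rw [← hn, hseg]
      simp
      omega
    rw [ih rest.length hlen rest (ebdCommit d pre) rfl]
    rw [ebdSegs_append pre rest hpre_nc]
    simp
  · rw [ebd_scan_commit part hc d, ebdSegs_no_comma part hc]
    simp

theorem ebd_loops_eq (part : List Char) :
    ((PySem.Chars.splitOn part ",".toList).foldl (fun d item =>
        if PySem.Chars.isIn "=".toList item then
          match PySem.Chars.splitOnMax item "=".toList 1 with
          | k :: v :: _ =>
              PySem.Dict.insert d (String.ofList (PySem.Chars.strip k)) (String.ofList (PySem.Chars.strip v))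
          | _ => d
        else d) (PySem.Dict.empty : PySem.Dict String String)).items =
    ((part ++ [',']).foldl ebdStep ((PySem.Dict.empty : PySem.Dict String String), [], [], false)).1.items := by
  rw [show ",".toList = [','] from rfl, ebd_splitOn_comma part, ebd_scan_eq_segs part]
  rfl

-- ===== VERDICT (by name: the statement is the Claim_ definition above) =====
theorem extract_body_data_spec : Claim_equal_extract_body_data := by
  intro text _
  show extract_body_data text = extract_body_data_alt text
  have hbs : ("body={".toList : List Char) ≠ [] := by decide
  have hfind := ebdFo_eq_find hbs text.toList
  cases hfo : ebdFo "body={".toList text.toList with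
  | none =>
    rw [hfo] at hfind
    replace hfind : PySem.Chars.find text.toList "body={".toList = -1 := hfind
    have hisin : PySem.Chars.isIn "body={".toList text.toList = false := by
      rw [Bool.eq_false_iff, Ne]
      intro h
      obtain ⟨j, hj⟩ := (PySem.Chars.exists_prefix_drop_iff_isIn _ _).mpr h
      exact ebdFo_none hbs _ hfo j hj
    rw [extract_body_data, extract_body_data_alt]
    rw [PySem.Str.isIn_eq, hisin]
    simp only [Bool.false_eq_true, if_false]
    rw [PySem.Str.find_eq, hfind]
    simp
  | some n =>
    rw [hfo] at hfind
    replace hfind : PySem.Chars.find text.toList "body={".toList = (n : Int) := hfind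
    obtain ⟨hp, _⟩ := ebdFo_some _ hfo
    have hisin : PySem.Chars.isIn "body={".toList text.toList = true := by
      rw [← PySem.Chars.exists_prefix_drop_iff_isIn]
      exact ⟨n, hp⟩
    have hA1 : PySem.Chars.splitOnMax text.toList "body={".toList 1 =
        [text.toList.take n, text.toList.drop (n + 6)] := by
      rw [ebd_splitOnMax_one hbs, hfo]
      try rfl
    have hrest : PySem.List.slice text.toList (some ((n : Int) + 6)) none =
        text.toList.drop (n + 6) := by
      rw [PySem.List.slice_from _ (by omega),
        show ((n : Int) + 6).toNat = n + 6 from by omega]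
    rw [extract_body_data, extract_body_data_alt]
    rw [PySem.Str.isIn_eq, hisin, if_pos rfl]
    rw [PySem.Str.find_eq, hfind]
    simp only [hA1]
    rw [show PySem.List.pyGet? [text.toList.take n, text.toList.drop (n + 6)] 1 =
      some (text.toList.drop (n + 6)) from rfl]
    simp only []
    rw [if_neg (by omega), hrest]
    set rest := text.toList.drop (n + 6) with hrestdef
    have hbr : ("}".toList : List Char) ≠ [] := by decide
    have hfind2 := ebdFo_eq_find hbr rest
    cases hfo2 : ebdFo "}".toList rest with
    | none =>
      rw [hfo2] at hfind2
      replace hfind2 : PySem.Chars.find rest "}".toList = -1 := hfind2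
      have hA2 : PySem.Chars.splitOnMax rest "}".toList 1 = [rest] := by
        rw [ebd_splitOnMax_one hbr, hfo2]
        try rfl
      rw [hA2, show PySem.List.pyGet? [rest] 0 = some rest from rfl]
      simp only []
      rw [hfind2, if_pos rfl]
      exact ebd_loops_eq rest
    | some m =>
      rw [hfo2] at hfind2
      replace hfind2 : PySem.Chars.find rest "}".toList = (m : Int) := hfind2
      have hA2 : PySem.Chars.splitOnMax rest "}".toList 1 =
          [rest.take m, rest.drop (m + 1)] := by
        rw [ebd_splitOnMax_one hbr, hfo2]
        try rfl
      rw [hA2, show PySem.List.pyGet? [rest.take m, rest.drop (m + 1)] 0 =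
        some (rest.take m) from rfl]
      simp only []
      rw [hfind2, if_neg (by omega)]
      rw [PySem.List.slice_to _ (by omega), show ((m : Int)).toNat = m from by omega]
      exact ebd_loops_eq (rest.take m)
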